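-- pv_equiv track=rewrite | github.com/itsmemdtofik/Python | Arrays/Easy/CountLengthOfCycle.py | countLengthOfCycle
-- ===== SOURCE A (Python) =====
-- def countLengthOfCycle(nums, start_index):
--
--     if not nums or start_index < 0 or start_index >= len(nums):
--         return -1
--
--     slow = start_index
--     fast = start_index
--
--     while 0 <= fast < len(nums):
--         slow = nums[slow]
--         fast = nums[fast]
--
--         if fast < 0 or fast >= len(nums):
--             break
--         fast = nums[fast]
--
--         if slow == fast:
--             cycle_len = 0
--             while True:
--                 slow = nums[slow]
--                 cycle_len += 1
--                 if slow == fast: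
--                     break
--             return cycle_len
--     return -1
-- ===== SOURCE B (Python) =====
-- def countLengthOfCycle(nums, start_index):
--     if not nums or start_index < 0 or start_index >= len(nums):
--         return -1
--     cur = start_index
--     step = 0
--     seen = {start_index: 0}
--     while True:
--         nxt = nums[cur]
--         if nxt < 0 or nxt >= len(nums):
--             return -1
--         step += 1
--         if nxt in seen:
--             return step - seen[nxt]
--         seen[nxt] = step
--         cur = nxt
-- ===== Notes on version B (the rewrite author's own statement) =====
-- stated objective: simpler
-- what changed: Replaced Floyd's two-pointer (slow/fast) cycle detection plus a second counting loop with a single-pointer walk that records each visited index's step number in a dict and returns step - seen[nxt] at the first revisit.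
import Mathlib
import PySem

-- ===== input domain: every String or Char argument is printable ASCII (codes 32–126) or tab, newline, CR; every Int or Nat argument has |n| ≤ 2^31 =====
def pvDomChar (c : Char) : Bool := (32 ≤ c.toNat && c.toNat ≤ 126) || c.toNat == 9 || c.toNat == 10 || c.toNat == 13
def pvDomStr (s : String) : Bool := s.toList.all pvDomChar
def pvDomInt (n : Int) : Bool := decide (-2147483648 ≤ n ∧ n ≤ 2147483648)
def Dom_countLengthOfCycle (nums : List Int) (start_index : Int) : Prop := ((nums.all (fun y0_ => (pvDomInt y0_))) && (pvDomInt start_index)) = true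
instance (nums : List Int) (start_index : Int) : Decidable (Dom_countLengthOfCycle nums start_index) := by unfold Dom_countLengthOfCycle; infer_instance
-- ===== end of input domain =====

-- B replaces Floyd's two-pointer cycle detection with a single-pointer walk that
-- records each visited index's step number in a dict (objective: simpler, one loop,
-- one pointer); both return -1 exactly when the walk leaves bounds.

-- Shared element access: Python's nums[i].  In both programs every index that is
-- actually used is first checked to lie in [0, len), so the IndexError/`none`
-- default 0 is never reached.
def pvElem (nums : List Int) (i : Int) : Int := (PySem.List.pyGet? nums i).getD 0

-- ===== PORT A =====
-- the inner `while True` loop (counts steps until slow returns to fast)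
def pvInnerA (nums : List Int) (fast : Int) : ℕ → Int → Int → Int
  | 0, _, cl => cl
  | fuel+1, slow, cl =>
    let slow' := pvElem nums slow
    let cl' := cl + 1
    if slow' = fast then cl' else pvInnerA nums fast fuel slow' cl'

-- the outer `while 0 <= fast < len(nums)` loop
def pvLoopA (nums : List Int) : ℕ → Int → Int → Int
  | 0, _, _ => -1
  | fuel+1, slow, fast =>
    if 0 ≤ fast ∧ fast < (nums.length : Int) then
      let slow' := pvElem nums slow
      let fast1 := pvElem nums fast
      if fast1 < 0 ∨ (nums.length : Int) ≤ fast1 then -1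
      else
        let fast' := pvElem nums fast1
        if slow' = fast' then pvInnerA nums fast' (nums.length + 1) slow' 0
        else pvLoopA nums fuel slow' fast'
    else -1

def countLengthOfCycle (nums : List Int) (start_index : Int) : Int :=
  if nums = [] ∨ start_index < 0 ∨ (nums.length : Int) ≤ start_index then -1
  else pvLoopA nums (nums.length + 1) start_index start_index

-- ===== PORT B =====
-- the `while True` loop of B: cur pointer, step counter, dict of first-visit steps
def pvLoopB (nums : List Int) : ℕ → Int → Int → PySem.Dict Int Int → Int
  | 0, _, _, _ => -1
  | fuel+1, cur, step, seen =>
    let nxt := pvElem nums cur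
    if nxt < 0 ∨ (nums.length : Int) ≤ nxt then -1
    else
      let step' := step + 1
      match seen.get? nxt with
      | some s => step' - s
      | none => pvLoopB nums fuel nxt step' (seen.insert nxt step')

def countLengthOfCycle_alt (nums : List Int) (start_index : Int) : Int :=
  if nums = [] ∨ start_index < 0 ∨ (nums.length : Int) ≤ start_index then -1
  else pvLoopB nums (nums.length + 1) start_index 0 (PySem.Dict.ofList [(start_index, 0)])

-- ===== PRECONDITION & SPEC =====
def Spec_countLengthOfCycle (nums : List Int) (start_index : Int) (out : Int) : Prop := out = countLengthOfCycle_alt nums start_index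
instance (nums : List Int) (start_index : Int) (out : Int) : Decidable (Spec_countLengthOfCycle nums start_index out) := by unfold Spec_countLengthOfCycle; infer_instance

-- ===== CLAIM (what is proved, stated in full; the proofs are below) =====
def Claim_equal_countLengthOfCycle : Prop := ∀ (nums : List Int) (start_index : Int), Dom_countLengthOfCycle nums start_index → Spec_countLengthOfCycle nums start_index (countLengthOfCycle nums start_index)

-- ===== LEMMAS AND PROOFS =====

-- the walk: position after k jumps starting from s
def pvW (nums : List Int) (s : Int) (k : ℕ) : Int := (pvElem nums)^[k] s

-- "index i is in bounds"
abbrev pvInb (nums : List Int) (i : Int) : Prop := 0 ≤ i ∧ i < (nums.length : Int)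

-- the dict B has built after k completed loop iterations
def pvSeen (nums : List Int) (s : Int) (k : ℕ) : PySem.Dict Int Int :=
  (List.range (k+1)).foldl (fun d j => d.insert (pvW nums s j) ((j : ℕ) : Int)) PySem.Dict.empty

theorem pvW_succ (nums : List Int) (s : Int) (k : ℕ) :
    pvW nums s (k+1) = pvElem nums (pvW nums s k) :=
  Function.iterate_succ_apply' _ _ _

theorem pvW_add (nums : List Int) (s : Int) (k d : ℕ) :
    pvW nums s (k + d) = (pvElem nums)^[d] (pvW nums s k) := by
  unfold pvW; rw [Nat.add_comm, Function.iterate_add_apply]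

-- a repeat propagates forward
theorem pvShift (nums : List Int) (s : Int) (a b : ℕ)
    (hab : pvW nums s a = pvW nums s b) (d : ℕ) :
    pvW nums s (a + d) = pvW nums s (b + d) := by
  rw [Nat.add_comm a d, Nat.add_comm b d]; unfold pvW
  rw [Function.iterate_add_apply, Function.iterate_add_apply]
  exact congrArg _ hab

-- after a repeat (a, b), every later position re-occurs at an index in [a, b)
theorem pvRange (nums : List Int) (s : Int) (a b : ℕ)
    (h : pvW nums s b = pvW nums s a) (hlt : a < b) :
    ∀ k, a ≤ k → ∃ j, a ≤ j ∧ j < b ∧ pvW nums s k = pvW nums s j := by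
  intro k hk
  induction k with
  | zero => exact ⟨0, Nat.le_zero.mp hk ▸ le_rfl, Nat.le_zero.mp hk ▸ hlt, rfl⟩
  | succ k ih =>
    rcases Nat.lt_or_ge a (k+1) with hlt' | hge
    · have hk' : a ≤ k := Nat.lt_succ_iff.mp hlt'
      obtain ⟨j, hja, hjb, hje⟩ := ih hk'
      rcases Nat.lt_or_ge (j+1) b with hjb' | hgeb
      · exact ⟨j+1, Nat.le_succ_of_le hja, hjb', by rw [pvW_succ, pvW_succ, hje]⟩
      · have hjb1 : j + 1 = b := by omega
        exact ⟨a, le_rfl, hlt, by rw [pvW_succ, hje, ← pvW_succ, hjb1, h]⟩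
    · have : a = k + 1 := by omega
      exact ⟨a, le_rfl, hlt, by rw [this]⟩

-- if the walk escapes at step m, positions before m are pairwise distinct
theorem pvNorep (nums : List Int) (s : Int) (m : ℕ)
    (hm0 : ¬ pvInb nums (pvW nums s m))
    (hltm : ∀ k, k < m → pvInb nums (pvW nums s k))
    (a b : ℕ) (hab : a < b) (hbm : b < m) :
    pvW nums s a ≠ pvW nums s b := by
  intro he
  obtain ⟨j, hja, hjb, hjm⟩ := pvRange nums s a b he.symm hab m (by omega)
  exact hm0 (hjm ▸ hltm j (by omega))

-- pigeonhole: if the walk never escapes, it repeats within the first n+1 positions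
theorem pvRepeat (nums : List Int) (s : Int)
    (hin : ∀ k, pvInb nums (pvW nums s k)) :
    ∃ j, j ≤ nums.length ∧ ∃ a, a < j ∧ pvW nums s a = pvW nums s j := by
  have hF : ∀ k : ℕ, (pvW nums s k).toNat < nums.length := by
    intro k
    have h := hin k
    omega
  obtain ⟨a, b, hne, heq⟩ := Fintype.exists_ne_map_eq_of_card_lt
    (fun k : Fin (nums.length + 1) => (⟨(pvW nums s k).toNat, hF k⟩ : Fin nums.length))
    (by simp)
  have hval : pvW nums s a = pvW nums s b := by
    have h1 := (hin a).1
    have h2 := (hin b).1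
    have := congrArg Fin.val heq
    simp at this
    omega
  have hne' : (a : ℕ) ≠ b := fun h => hne (Fin.ext h)
  rcases Nat.lt_or_lt_of_ne hne' with h | h
  · exact ⟨b, Nat.lt_succ_iff.mp b.isLt, a, h, hval⟩
  · exact ⟨a, Nat.lt_succ_iff.mp a.isLt, b, h, hval.symm⟩

-- if the walk escapes at minimal step m, then m ≤ n
theorem pvEscapeLe (nums : List Int) (s : Int) (m : ℕ)
    (hm0 : ¬ pvInb nums (pvW nums s m))
    (hltm : ∀ k, k < m → pvInb nums (pvW nums s k)) :
    m ≤ nums.length := by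
  have hF : ∀ k : Fin m, (pvW nums s k).toNat < nums.length := by
    intro k
    have h := hltm k k.isLt
    omega
  have hinj : Function.Injective (fun k : Fin m => (⟨(pvW nums s k).toNat, hF k⟩ : Fin nums.length)) := by
    intro a b h
    have hv : (pvW nums s a).toNat = (pvW nums s b).toNat := congrArg Fin.val h
    have h1 := (hltm a a.isLt).1
    have h2 := (hltm b b.isLt).1
    have hval : pvW nums s (a : ℕ) = pvW nums s b := by omega
    rcases Nat.lt_trichotomy (a : ℕ) b with hlt | heq | hgt
    · exact absurd hval (pvNorep nums s m hm0 hltm a b hlt b.isLt)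
    · exact Fin.ext heq
    · exact absurd hval.symm (pvNorep nums s m hm0 hltm b a hgt a.isLt)
  simpa using Fintype.card_le_of_injective _ hinj

-- ===== A, escape case =====
theorem loopA_escape (nums : List Int) (s : Int) (m : ℕ)
    (hm0 : ¬ pvInb nums (pvW nums s m))
    (hltm : ∀ k, k < m → pvInb nums (pvW nums s k)) :
    ∀ fuel t, 2*t ≤ m → m + 1 - t ≤ fuel →
      pvLoopA nums fuel (pvW nums s t) (pvW nums s (2*t)) = -1 := by
  intro fuel
  induction fuel with
  | zero => intro t h1 h2; omega
  | succ fuel ih =>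
    intro t h1 _h2
    rcases Nat.lt_or_ge (2*t) m with hlt | hge
    · -- loop guard passes
      have htop := hltm (2*t) hlt
      rw [pvLoopA, if_pos htop]
      simp only [← pvW_succ]
      rcases Nat.lt_or_ge (2*t+1) m with hmid | hmid
      · -- mid check passes
        have hmid' := hltm (2*t+1) hmid
        rw [if_neg (by simp only [pvInb] at hmid'; omega)]
        have hne : pvW nums s (t+1) ≠ pvW nums s (2*t+1+1) := by
          rcases Nat.lt_or_ge (2*t+1+1) m with hend | hend
          · exact pvNorep nums s m hm0 hltm (t+1) (2*t+1+1) (by omega) hend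
          · have hendm : 2*t+1+1 = m := by omega
            intro he
            exact hm0 (hendm ▸ he ▸ hltm (t+1) (by omega))
        rw [if_neg hne]
        have := ih (t+1) (by omega) (by omega)
        have harg : 2*(t+1) = 2*t+1+1 := by omega
        rw [harg] at this
        exact this
      · -- mid check fails: 2*t+1 = m
        have hmidm : 2*t+1 = m := by omega
        rw [if_pos (by rw [hmidm]; simp only [pvInb] at hm0; omega)]
    · -- loop guard fails: 2*t = m
      have htopm : 2*t = m := by omega
      rw [pvLoopA, if_neg (by rw [htopm]; exact hm0)]

theorem pvSeen_zero (nums : List Int) (s : Int) :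
    pvSeen nums s 0 = PySem.Dict.empty.insert s 0 := by
  simp [pvSeen, pvW, List.range_succ]

theorem pvOfList_single (s : Int) :
    PySem.Dict.ofList [((s : Int), (0 : Int))] = PySem.Dict.empty.insert s 0 := by
  rfl

theorem pvSeen_succ (nums : List Int) (s : Int) (k : ℕ) :
    pvSeen nums s (k+1) = (pvSeen nums s k).insert (pvW nums s (k+1)) (((k+1 : ℕ) : Int)) := by
  simp [pvSeen, List.range_succ]

theorem pvSeen_get?_none (nums : List Int) (s v : Int) (k : ℕ)
    (h : ∀ j, j ≤ k → pvW nums s j ≠ v) :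
    (pvSeen nums s k).get? v = none := by
  induction k with
  | zero =>
    rw [pvSeen_zero,
      PySem.Dict.get?_insert_of_ne _ _ (show v ≠ s from fun he => h 0 le_rfl (Eq.symm he)),
      PySem.Dict.get?_empty]
  | succ k ih =>
    rw [pvSeen_succ,
      PySem.Dict.get?_insert_of_ne _ _ (fun he => h (k+1) le_rfl (Eq.symm he))]
    exact ih (fun j hj => h j (by omega))

theorem pvSeen_get?_some (nums : List Int) (s : Int) (k : ℕ)
    (hnd : ∀ a b, a < b → b ≤ k → pvW nums s a ≠ pvW nums s b) :
    ∀ j, j ≤ k → (pvSeen nums s k).get? (pvW nums s j) = some ((j : ℕ) : Int) := by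
  induction k with
  | zero =>
    intro j hj
    have hj0 : j = 0 := by omega
    subst hj0
    rw [pvSeen_zero]
    exact PySem.Dict.get?_insert_self _ _ _
  | succ k ih =>
    intro j hj
    rcases Nat.lt_or_ge j (k+1) with hlt | hge
    · rw [pvSeen_succ,
        PySem.Dict.get?_insert_of_ne _ _ (hnd j (k+1) hlt le_rfl)]
      exact ih (fun a b hab hbk => hnd a b hab (by omega)) j (by omega)
    · have hj1 : j = k + 1 := by omega
      subst hj1
      rw [pvSeen_succ]
      exact PySem.Dict.get?_insert_self _ _ _

-- ===== B, escape case =====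
theorem loopB_escape (nums : List Int) (s : Int) (m : ℕ)
    (hm0 : ¬ pvInb nums (pvW nums s m))
    (hltm : ∀ k, k < m → pvInb nums (pvW nums s k)) :
    ∀ fuel k, k < m → m - k ≤ fuel →
      pvLoopB nums fuel (pvW nums s k) ((k : ℕ) : Int) (pvSeen nums s k) = -1 := by
  intro fuel
  induction fuel with
  | zero => intro k h1 h2; omega
  | succ fuel ih =>
    intro k h1 _h2
    rw [pvLoopB]
    simp only [← pvW_succ]
    rcases Nat.lt_or_ge (k+1) m with hlt | hge
    · -- still in bounds: dict misses, loop continues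
      have hk1 := hltm (k+1) hlt
      rw [if_neg (by simp only [pvInb] at hk1; omega)]
      have hnone : (pvSeen nums s k).get? (pvW nums s (k+1)) = none :=
        pvSeen_get?_none nums s _ k
          (fun j hj => pvNorep nums s m hm0 hltm j (k+1) (by omega) hlt)
      simp only [hnone]
      have hcast : ((k : ℕ) : Int) + 1 = (((k+1 : ℕ) : ℕ) : Int) := by push_cast; ring
      rw [hcast, ← pvSeen_succ]
      exact ih (k+1) hlt (by omega)
    · -- next position escapes
      have hkm : k + 1 = m := by omega
      rw [if_pos (by rw [hkm]; simp only [pvInb] at hm0; omega)]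


-- ===== A, cycle case: the inner counting loop returns the minimal period =====
theorem innerA_run (nums : List Int) (p : Int) (r : ℕ) (_hr : 0 < r)
    (hmin : Function.minimalPeriod (pvElem nums) p = r) :
    ∀ fuel c, c < r → r - c ≤ fuel →
      pvInnerA nums p fuel ((pvElem nums)^[c] p) ((c : ℕ) : Int) = ((r : ℕ) : Int) := by
  have hper : (pvElem nums)^[r] p = p := by
    have h := Function.isPeriodicPt_minimalPeriod (pvElem nums) p
    rwa [hmin] at h
  intro fuel
  induction fuel with
  | zero => intro c h1 h2; omega
  | succ fuel ih =>
    intro c h1 _h2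
    rw [pvInnerA]
    simp only [← Function.iterate_succ_apply']
    rcases Nat.lt_or_ge (c+1) r with hlt | hge
    · have hne : ¬ ((pvElem nums)^[c+1] p = p) := by
        intro he
        have : Function.minimalPeriod (pvElem nums) p ≤ c+1 :=
          Function.IsPeriodicPt.minimalPeriod_le (by omega) he
        omega
      rw [if_neg hne]
      have hcast : ((c : ℕ) : Int) + 1 = (((c+1 : ℕ)) : Int) := by push_cast; ring
      rw [hcast]
      exact ih (c+1) hlt (by omega)
    · have hc1 : c + 1 = r := by omega
      have hcond : (pvElem nums)^[c.succ] p = p := by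
        rw [Nat.succ_eq_add_one, hc1]; exact hper
      rw [if_pos hcond]
      omega

-- ===== A, cycle case: the outer loop reaches the first meeting =====
theorem loopA_meet (nums : List Int) (s : Int)
    (hin : ∀ k, pvInb nums (pvW nums s k))
    (istar : ℕ) (_hist1 : 1 ≤ istar)
    (hmeet : pvW nums s istar = pvW nums s (2*istar))
    (hminmeet : ∀ i, 1 ≤ i → pvW nums s i = pvW nums s (2*i) → istar ≤ i)
    (r : ℕ) (hr : 0 < r)
    (hminp : Function.minimalPeriod (pvElem nums) (pvW nums s (2*istar)) = r)
    (hrn : r ≤ nums.length) :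
    ∀ fuel t, t < istar → istar - t ≤ fuel →
      pvLoopA nums fuel (pvW nums s t) (pvW nums s (2*t)) = ((r : ℕ) : Int) := by
  intro fuel
  induction fuel with
  | zero => intro t h1' h2; omega
  | succ fuel ih =>
    intro t ht _h2
    have htop := hin (2*t)
    rw [pvLoopA, if_pos htop]
    simp only [← pvW_succ]
    have hmid := hin (2*t+1)
    rw [if_neg (by simp only [pvInb] at hmid; omega)]
    by_cases heq : pvW nums s (t+1) = pvW nums s (2*t+1+1)
    · rw [if_pos heq]
      have h2t : 2*t+1+1 = 2*(t+1) := by omega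
      have hist : t + 1 = istar := by
        have := hminmeet (t+1) (by omega) (by rw [h2t] at heq; exact heq)
        omega
      have hfast : pvW nums s (2*t+1+1) = pvW nums s (2*istar) := by rw [h2t, hist]
      have hslow : pvW nums s (t+1) = pvW nums s (2*istar) := by
        rw [hist]; exact hmeet
      rw [hfast, hslow]
      have := innerA_run nums (pvW nums s (2*istar)) r hr hminp (nums.length+1) 0 hr (by omega)
      simpa using this
    · rw [if_neg heq]
      have hlt : t + 1 < istar := by
        by_cases h' : t + 1 = istar
        · exfalso
          apply heq
          have h2t : 2*t+1+1 = 2*istar := by omega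
          rw [h2t, h']
          exact hmeet
        · omega
      have hrec := ih (t+1) hlt (by omega)
      have h2t : 2*(t+1) = 2*t+1+1 := by omega
      rw [h2t] at hrec
      exact hrec

-- ===== B, cycle case: the walk returns first-repeat minus first-occurrence =====
theorem loopB_repeat (nums : List Int) (s : Int)
    (hin : ∀ k, pvInb nums (pvW nums s k))
    (j0 i0 : ℕ) (hij : i0 < j0)
    (heq0 : pvW nums s i0 = pvW nums s j0)
    (norep0 : ∀ a b, a < b → b < j0 → pvW nums s a ≠ pvW nums s b) :
    ∀ fuel k, k < j0 → j0 - k ≤ fuel →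
      pvLoopB nums fuel (pvW nums s k) ((k : ℕ) : Int) (pvSeen nums s k) = ((j0 : ℕ) : Int) - ((i0 : ℕ) : Int) := by
  intro fuel
  induction fuel with
  | zero => intro k h1 h2; omega
  | succ fuel ih =>
    intro k hk _h2
    rw [pvLoopB]
    simp only [← pvW_succ]
    have hk1 := hin (k+1)
    rw [if_neg (by simp only [pvInb] at hk1; omega)]
    rcases Nat.lt_or_ge (k+1) j0 with hlt | hge
    · have hnone := pvSeen_get?_none nums s (pvW nums s (k+1)) k
        (fun j hj => norep0 j (k+1) (by omega) hlt)
      simp only [hnone]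
      have hcast : ((k : ℕ) : Int) + 1 = (((k+1 : ℕ)) : Int) := by push_cast; ring
      rw [hcast, ← pvSeen_succ]
      exact ih (k+1) hlt (by omega)
    · have hkj : k + 1 = j0 := by omega
      have hsome : (pvSeen nums s k).get? (pvW nums s (k+1)) = some ((i0 : ℕ) : Int) := by
        have hrw : pvW nums s (k+1) = pvW nums s i0 := by rw [hkj]; exact heq0.symm
        rw [hrw]
        exact pvSeen_get?_some nums s k (fun a b hab hbk => norep0 a b hab (by omega)) i0 (by omega)
      simp only [hsome]
      omega

-- ===== VERDICT (by name: the statement is the Claim_ definition above) =====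
theorem countLengthOfCycle_spec : Claim_equal_countLengthOfCycle := by
  intro nums s _dom
  unfold Spec_countLengthOfCycle countLengthOfCycle countLengthOfCycle_alt
  by_cases hg : nums = [] ∨ s < 0 ∨ (nums.length : Int) ≤ s
  · rw [if_pos hg, if_pos hg]
  · rw [if_neg hg, if_neg hg]
    push_neg at hg
    obtain ⟨hne, hs0, hsl⟩ := hg
    have hw0 : pvW nums s 0 = s := rfl
    by_cases hesc : ∃ k, ¬ pvInb nums (pvW nums s k)
    · -- the walk leaves the array: both return -1
      have hm0 : ¬ pvInb nums (pvW nums s (Nat.find hesc)) := Nat.find_spec hesc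
      have hltm : ∀ k, k < Nat.find hesc → pvInb nums (pvW nums s k) :=
        fun k hk => not_not.mp (Nat.find_min hesc hk)
      have hmpos : 0 < Nat.find hesc := by
        rcases Nat.eq_zero_or_pos (Nat.find hesc) with h0 | h
        · exact absurd (by rw [h0, hw0]; exact ⟨hs0, hsl⟩) hm0
        · exact h
      have hmn : Nat.find hesc ≤ nums.length := pvEscapeLe nums s _ hm0 hltm
      have hA := loopA_escape nums s _ hm0 hltm (nums.length+1) 0 (by omega) (by omega)
      have hB := loopB_escape nums s _ hm0 hltm (nums.length+1) 0 hmpos (by omega)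
      rw [pvSeen_zero] at hB
      rw [pvOfList_single]
      have hA' : pvLoopA nums (nums.length+1) s s = -1 := by simpa [pvW] using hA
      have hB' : pvLoopB nums (nums.length+1) s 0 (PySem.Dict.empty.insert s 0) = -1 := by
        simpa [pvW] using hB
      rw [hA', hB']
    · -- the walk stays inside: it cycles, both return the cycle length
      push_neg at hesc
      have hin : ∀ k, pvInb nums (pvW nums s k) := hesc
      obtain ⟨jw, hjwn, hjrep⟩ := pvRepeat nums s hin
      haveI hdec : DecidablePred (fun j => ∃ a, a < j ∧ pvW nums s a = pvW nums s j) :=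
        fun j => decidable_of_iff (∃ a ∈ List.range j, pvW nums s a = pvW nums s j)
          (by simp [List.mem_range])
      have hex : ∃ j, ∃ a, a < j ∧ pvW nums s a = pvW nums s j := ⟨jw, hjrep⟩
      have hj0spec : ∃ a, a < Nat.find hex ∧ pvW nums s a = pvW nums s (Nat.find hex) :=
        Nat.find_spec hex
      set j0 := Nat.find hex with hj0def
      have hj0n : j0 ≤ nums.length := le_trans (Nat.find_min' hex hjrep) hjwn
      have norep0 : ∀ a b, a < b → b < j0 → pvW nums s a ≠ pvW nums s b := by
        intro a b hab hbj he
        exact Nat.find_min hex hbj ⟨a, hab, he⟩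
      set i0 := Nat.find hj0spec with hi0def
      have hi0 : i0 < j0 ∧ pvW nums s i0 = pvW nums s j0 := Nat.find_spec hj0spec
      set r := j0 - i0 with hrdef
      have hr : 0 < r := by omega
      have hperi : (pvElem nums)^[r] (pvW nums s i0) = pvW nums s i0 := by
        calc (pvElem nums)^[r] (pvW nums s i0)
            = pvW nums s (i0 + r) := (pvW_add nums s i0 r).symm
          _ = pvW nums s j0 := by congr 1; omega
          _ = pvW nums s i0 := hi0.2.symm
      have hmem : pvW nums s i0 ∈ Function.periodicPts (pvElem nums) :=
        Function.mk_mem_periodicPts hr hperi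
      have hmin0 : Function.minimalPeriod (pvElem nums) (pvW nums s i0) = r := by
        apply le_antisymm
        · exact Function.IsPeriodicPt.minimalPeriod_le hr hperi
        · by_contra h
          push_neg at h
          have hqpos : 0 < Function.minimalPeriod (pvElem nums) (pvW nums s i0) :=
            Function.minimalPeriod_pos_of_mem_periodicPts hmem
          have hqper := Function.isPeriodicPt_minimalPeriod (pvElem nums) (pvW nums s i0)
          have hrep : pvW nums s (i0 + Function.minimalPeriod (pvElem nums) (pvW nums s i0))
              = pvW nums s i0 := by
            rw [pvW_add]; exact hqper
          exact norep0 i0 (i0 + Function.minimalPeriod (pvElem nums) (pvW nums s i0))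
            (by omega) (by omega) hrep.symm
      have hshift : ∀ k, i0 ≤ k → pvW nums s (k + r) = pvW nums s k := by
        intro k hk
        obtain ⟨d, rfl⟩ := Nat.exists_eq_add_of_le hk
        calc pvW nums s (i0 + d + r) = pvW nums s (j0 + d) := by congr 1; omega
          _ = pvW nums s (i0 + d) := (pvShift nums s i0 j0 hi0.2 d).symm
      have hshiftc : ∀ c k, i0 ≤ k → pvW nums s (k + c*r) = pvW nums s k := by
        intro c
        induction c with
        | zero => simp
        | succ c ihc =>
          intro k hk
          calc pvW nums s (k + (c+1)*r) = pvW nums s ((k + r) + c*r) := by congr 1; ring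
            _ = pvW nums s (k + r) := ihc (k+r) (by omega)
            _ = pvW nums s k := hshift k hk
      -- Floyd's meeting point exists, at a multiple of r past i0
      have hw1 : 1 ≤ r * (i0 / r + 1) := Nat.one_le_iff_ne_zero.mpr (by positivity)
      have hii0 : i0 < r * (i0 / r + 1) := by
        have hdm := Nat.div_add_mod i0 r
        have hmod : i0 % r < r := Nat.mod_lt _ hr
        have hmul : r * (i0 / r + 1) = r * (i0 / r) + r := by ring
        omega
      have hw2 : pvW nums s (r * (i0 / r + 1)) = pvW nums s (2 * (r * (i0 / r + 1))) := by
        have h2i : 2 * (r * (i0 / r + 1)) = (r * (i0 / r + 1)) + (i0 / r + 1) * r := by ring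
        rw [h2i, hshiftc (i0/r+1) (r * (i0 / r + 1)) (by omega)]
      have hM : ∃ i, 1 ≤ i ∧ pvW nums s i = pvW nums s (2*i) := ⟨_, hw1, hw2⟩
      set istar := Nat.find hM with histdef
      have histar : 1 ≤ istar ∧ pvW nums s istar = pvW nums s (2*istar) := Nat.find_spec hM
      have hminmeet : ∀ i, 1 ≤ i → pvW nums s i = pvW nums s (2*i) → istar ≤ i :=
        fun i h1 h2 => Nat.find_min' hM ⟨h1, h2⟩
      have hwit_le : r * (i0 / r + 1) ≤ j0 := by
        have h1 : i0 / r * r ≤ i0 := Nat.div_mul_le_self i0 r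
        have hmul : r * (i0 / r + 1) = i0 / r * r + r := by ring
        omega
      have histn : istar ≤ nums.length :=
        le_trans (le_trans (Nat.find_min' hM ⟨hw1, hw2⟩) hwit_le) hj0n
      have h2istar : j0 ≤ 2*istar := by
        by_contra h
        push_neg at h
        exact norep0 istar (2*istar) (by omega) h histar.2
      have hminp : Function.minimalPeriod (pvElem nums) (pvW nums s (2*istar)) = r := by
        obtain ⟨d, hd⟩ := Nat.exists_eq_add_of_le (show i0 ≤ 2*istar by omega)
        rw [hd, pvW_add, Function.minimalPeriod_apply_iterate hmem d]
        exact hmin0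
      have hA := loopA_meet nums s hin istar histar.1 histar.2 hminmeet r hr hminp
        (by omega) (nums.length+1) 0 (by omega) (by omega)
      have hB := loopB_repeat nums s hin j0 i0 hi0.1 hi0.2 norep0
        (nums.length+1) 0 (by omega) (by omega)
      rw [pvSeen_zero] at hB
      rw [pvOfList_single]
      have hA' : pvLoopA nums (nums.length+1) s s = ((r : ℕ) : Int) := by
        simpa [pvW] using hA
      have hB' : pvLoopB nums (nums.length+1) s 0 (PySem.Dict.empty.insert s 0)
          = ((j0 : ℕ) : Int) - ((i0 : ℕ) : Int) := by
        simpa [pvW] using hB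
      rw [hA', hB']
      omega
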